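-- pv_equiv track=rewrite | github.com/bukhantcev/ManunyaBot | dip.py | set_dip_switches
-- ===== SOURCE A (Python) =====
-- def set_dip_switches(dmx_address):
--
--     dip_switches = []
--
--     for i in range(10):
--
--         if dmx_address & (1 << i):
--             dip_switches.append(True)
--         else:
--             dip_switches.append(False)
--
--
--     answer = ''
--     for i in range(len(dip_switches)):
--         if dip_switches[i]:
--             answer = answer + ' ' + str(i + 1)
--
--     result = f'Адрес: {dmx_address}\nON: {answer}'
--
--     return result
-- ===== SOURCE B (Python) =====
-- def _on_list(n, pos):
--     if pos > 10:
--         return ''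
--     q, r = divmod(n, 2)
--     rest = _on_list(q, pos + 1)
--     return ' ' + str(pos) + rest if r else rest
--
--
-- def set_dip_switches(dmx_address):
--     return f'Адрес: {dmx_address}\nON: {_on_list(dmx_address, 1)}'
-- ===== Notes on version B (the rewrite author's own statement) =====
-- stated objective: alternative
-- what changed: Replaced A's bitmask approach (build a 10-element boolean table by AND-ing with shifted masks, then rescan it by index) with a recursive repeated-divmod-by-2 digit extraction that carries the quotient as state and emits each switch position front-to-back; no mask, no shift, no intermediate table.
import Mathlib
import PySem

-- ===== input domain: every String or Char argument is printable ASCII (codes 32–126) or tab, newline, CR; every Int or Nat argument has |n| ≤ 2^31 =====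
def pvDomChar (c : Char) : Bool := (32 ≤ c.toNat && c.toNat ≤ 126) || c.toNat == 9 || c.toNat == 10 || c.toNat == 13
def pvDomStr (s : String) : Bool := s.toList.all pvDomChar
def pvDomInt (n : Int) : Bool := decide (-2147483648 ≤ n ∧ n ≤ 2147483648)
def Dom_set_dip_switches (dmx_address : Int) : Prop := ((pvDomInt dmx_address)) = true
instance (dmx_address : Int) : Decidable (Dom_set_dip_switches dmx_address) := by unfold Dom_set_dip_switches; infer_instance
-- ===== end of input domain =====

-- B replaces A's bitmask table (AND with shifted masks, then rescan by index) with recursive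
-- repeated divmod-by-2 digit extraction carrying the quotient as state; objective: alternative.

-- ===== PORT A =====
def set_dip_switches (dmx_address : Int) : String :=
  -- dip_switches = []; for i in range(10): append(bool of dmx_address & (1 << i))
  let dip_switches : List Bool :=
    (PySem.List.pyRange 0 10 1).foldl
      (fun acc i =>
        if PySem.Int.band dmx_address ((1:Int) <<< (i.toNat : Int)) ≠ 0 then acc ++ [true]
        else acc ++ [false]) []
      -- i ∈ 0..9, so `i.toNat` is exact for Python's `1 << i`
  -- answer = ''; for i in range(len(dip_switches)): if dip_switches[i]: answer = answer + ' ' + str(i+1)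
  let answer : String :=
    (PySem.List.pyRange 0 (PySem.List.len dip_switches) 1).foldl
      (fun acc i =>
        if (PySem.List.pyGet? dip_switches i).getD false = true then
          acc ++ " " ++ PySem.Int.toStr (i + 1)
        else acc) ""
      -- the index i is always in range, so pyGet? is some; getD false never takes its default
  "Адрес: " ++ PySem.Int.toStr dmx_address ++ "\nON: " ++ answer

-- ===== PORT B =====
-- def _on_list(n, pos): if pos > 10: return ''; q, r = divmod(n, 2); rest = _on_list(q, pos+1);
--                       return ' ' + str(pos) + rest if r else rest
-- (pos is the positive loop counter 1..11, so Nat is exact for it)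
def onList (n : Int) (pos : Nat) : String :=
  if pos > 10 then ""
  else
    let q := PySem.Int.floordiv n 2
    let r := PySem.Int.mod n 2
    let rest := onList q (pos + 1)
    if r != 0 then " " ++ PySem.Int.toStr (pos : Int) ++ rest else rest
termination_by 11 - pos

def set_dip_switches_alt (dmx_address : Int) : String :=
  "Адрес: " ++ PySem.Int.toStr dmx_address ++ "\nON: " ++ onList dmx_address 1

-- ===== PRECONDITION & SPEC =====
def Spec_set_dip_switches (dmx_address : Int) (out : String) : Prop := out = set_dip_switches_alt dmx_address
instance (dmx_address : Int) (out : String) : Decidable (Spec_set_dip_switches dmx_address out) := by unfold Spec_set_dip_switches; infer_instance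

-- ===== CLAIM (what is proved, stated in full; the proofs are below) =====
def Claim_equal_set_dip_switches : Prop := ∀ (dmx_address : Int), Dom_set_dip_switches dmx_address → Spec_set_dip_switches dmx_address (set_dip_switches dmx_address)

-- ===== LEMMAS AND PROOFS =====

-- proof-side abbreviation: Python's test `n & (1 << k)` as a Bool
def bitTest (n : Int) (k : Nat) : Bool := PySem.Int.band n ((1:Int) <<< (k:Int)) != 0

lemma shl_eq (k : Nat) : (1:Int) <<< ((k:Nat):Int) = ((2^k : Nat) : Int) := by
  rw [show (1:Int) = ((1:Nat):Int) from rfl, Int.shiftLeft_natCast, Nat.one_shiftLeft]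

lemma range10_cast : PySem.List.pyRange 0 10 1 = (List.range 10).map (Nat.cast) := by decide

-- the dip list A builds is exactly the table of the ten bit tests
lemma dip_eq (n : Int) :
    (PySem.List.pyRange 0 10 1).foldl
      (fun acc i =>
        if PySem.Int.band n ((1:Int) <<< (i.toNat : Int)) ≠ 0 then acc ++ [true] else acc ++ [false]) []
    = (List.range 10).map (bitTest n) := by
  rw [range10_cast, List.foldl_map]
  have h : ∀ (acc : List Bool) (i : Nat), i ∈ List.range 10 →
      (if PySem.Int.band n ((1:Int) <<< (((i:Int)).toNat : Int)) ≠ 0 then acc ++ [true] else acc ++ [false])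
      = acc ++ [bitTest n i] := by
    intro acc i _
    split_ifs with h <;> simp_all [Int.toNat_natCast, bitTest]
  refine Eq.trans (PySem.List.foldl_congr_mem _ _ _ _ h) ?_
  simpa using PySem.List.foldl_append_singleton_eq_map _ _ []

lemma join_cons (x : String) (l : List String) :
    String.join (x :: l) = x ++ String.join l := by
  simp [String.join_eq]

lemma join_snoc (l : List String) (x : String) :
    String.join (l ++ [x]) = String.join l ++ x := by
  simp [String.join, List.foldl_append]

-- a conditional-append fold over range k equals the join of the filtered, mapped range
lemma key (c : Nat → Bool) (s : Nat → String) (k : Nat) :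
    (List.range k).foldl (fun acc i => if c i then acc ++ s i else acc) ""
    = String.join (((List.range k).filter c).map s) := by
  suffices h : ∀ (acc : String),
      (List.range k).foldl (fun acc i => if c i then acc ++ s i else acc) acc
      = acc ++ String.join (((List.range k).filter c).map s) by
    simpa using h ""
  induction k with
  | zero => intro acc; simp [String.join]
  | succ k ih =>
    intro acc
    rw [List.range_succ, List.foldl_append, List.filter_append, ih]
    by_cases hc : c k <;> simp [hc, join_snoc, String.append_assoc]

-- A's second loop, reading the bit table, equals the filtered join of the bit positions
lemma answer_eq (n : Int) :
    (List.range 10).foldl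
      (fun acc (i : Nat) =>
        if (PySem.List.pyGet? ((List.range 10).map (bitTest n)) (i:Int)).getD false = true then
          acc ++ " " ++ PySem.Int.toStr ((i:Int) + 1) else acc) ""
    = String.join (((List.range 10).filter (bitTest n)).map
        (fun i : Nat => " " ++ PySem.Int.toStr ((i : Int) + 1))) := by
  have h : ∀ (acc : String) (i : Nat), i ∈ List.range 10 →
      (if (PySem.List.pyGet? ((List.range 10).map (bitTest n)) (i:Int)).getD false = true then
          acc ++ " " ++ PySem.Int.toStr ((i:Int) + 1) else acc)
      = (if bitTest n i then acc ++ (" " ++ PySem.Int.toStr ((i:Int) + 1)) else acc) := by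
    intro acc i hi
    have hi10 : i < 10 := by simpa using hi
    simp [hi10, String.append_assoc]
  exact Eq.trans (PySem.List.foldl_congr_mem _ _ _ _ h) (key _ _ 10)

lemma bne_zero_congr (a b : Nat) (ha : a ≠ 0) (hb : b ≠ 0) : ((a:Int) != 0) = ((b:Int) != 0) := by
  rw [Bool.eq_iff_iff]; simp [ha, hb]

-- bit 0 is the parity Python's divmod(n, 2) extracts
lemma bt_zero (n : Int) : bitTest n 0 = (PySem.Int.mod n 2 != 0) := by
  have h : (1:Int) <<< (((0:Nat)):Int) = 1 := by rw [shl_eq]; norm_num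
  rw [bitTest, h, PySem.Int.band_one]

-- bit j+1 of n is bit j of n // 2 (Python floor division), on both signs
lemma bt_succ (n : Int) (j : Nat) :
    bitTest n (j+1) = bitTest (PySem.Int.floordiv n 2) j := by
  rw [bitTest, bitTest, shl_eq, shl_eq]
  have e1 : (2:Nat)^(j+1) ≠ 0 := by positivity
  have e2 : (2:Nat)^j ≠ 0 := by positivity
  cases n with
  | ofNat m =>
    have h1 : PySem.Int.floordiv (Int.ofNat m) 2 = ((m / 2 : Nat) : Int) := by
      exact_mod_cast PySem.Int.floordiv_natCast m 2
    rw [h1]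
    simp only [Int.ofNat_eq_natCast, PySem.Int.band_natCast]
    rw [Nat.and_two_pow, Nat.and_two_pow, Nat.testBit_add_one m j]
    cases (m / 2).testBit j
    · simp
    · simp only [Bool.toNat_true, Nat.one_mul]
      exact bne_zero_congr _ _ e1 e2
  | negSucc m =>
    have h1 : PySem.Int.floordiv (Int.negSucc m) 2 = Int.negSucc (m / 2) := by
      show Int.fdiv _ _ = _
      rfl
    have hb : ∀ (p : Nat) (i : Nat), PySem.Int.band (Int.negSucc p) ((2^i : Nat) : Int)
        = ((2^i - (2^i &&& p) : Nat) : Int) := by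
      intro p i
      unfold PySem.Int.band
      norm_num
      have hp : ((2:Int)^i) = ((2^i : Nat) : Int) := by push_cast; ring_nf
      rw [hp, Int.toNat_natCast]
    rw [h1, hb, hb]
    have h2 := Nat.and_two_pow m (j+1)
    have h3 := Nat.and_two_pow (m/2) j
    rw [Nat.testBit_add_one m j] at h2
    rw [Nat.and_comm] at h2 h3
    cases hc : (m / 2).testBit j
    · rw [hc] at h2 h3; simp only [Bool.toNat_false, Nat.zero_mul] at h2 h3
      rw [h2, h3, Nat.sub_zero, Nat.sub_zero]
      exact bne_zero_congr _ _ e1 e2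
    · rw [hc] at h2 h3; simp only [Bool.toNat_true, Nat.one_mul] at h2 h3
      rw [h2, h3]
      simp

-- B's recursion from position s+1 is the filtered join of the bit positions s..9
lemma onList_eq : ∀ (d s : Nat) (n : Int), s + d = 10 →
    onList n (s+1)
    = String.join (((List.range d).filter (bitTest n)).map
        (fun j : Nat => " " ++ PySem.Int.toStr ((s:Int) + (j:Int) + 1))) := by
  intro d
  induction d with
  | zero =>
    intro s n hs
    have : s = 10 := by omega
    subst this
    simp [onList, String.join]
  | succ d ih =>
    intro s n hs
    have hle : ¬ (s + 1 > 10) := by omega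
    rw [onList]
    simp only [hle, if_false]
    rw [List.range_succ_eq_map, List.filter_cons, List.filter_map]
    have hcs : ((bitTest n) ∘ Nat.succ) = bitTest (PySem.Int.floordiv n 2) := by
      funext j; simpa [Function.comp] using bt_succ n j
    have hf : ((fun j : Nat => " " ++ PySem.Int.toStr ((s:Int) + (j:Int) + 1)) ∘ Nat.succ)
        = (fun j : Nat => " " ++ PySem.Int.toStr (((s+1 : Nat):Int) + (j:Int) + 1)) := by
      funext j; simp only [Function.comp]; congr 1; push_cast; ring_nf
    rw [hcs, bt_zero]
    have hrec := ih (s+1) (PySem.Int.floordiv n 2) (by omega)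
    cases (PySem.Int.mod n 2 != 0)
    · simp only [Bool.false_eq_true, if_false]
      rw [hrec, List.map_map, hf]
    · simp only [if_true]
      rw [List.map_cons, join_cons, List.map_map, hf, hrec]
      have h0 : ((s:Int) + ((0:Nat):Int) + 1) = (((s+1 : Nat)):Int) := by push_cast; ring_nf
      rw [h0, String.append_assoc]

-- ===== VERDICT (by name: the statement is the Claim_ definition above) =====
theorem set_dip_switches_spec : Claim_equal_set_dip_switches := by
  intro n _
  unfold Spec_set_dip_switches set_dip_switches set_dip_switches_alt
  dsimp only
  rw [dip_eq]
  have hlen : PySem.List.len ((List.range 10).map (bitTest n)) = (10:Int) := by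
    simp [PySem.List.len]
  rw [hlen, range10_cast, List.foldl_map, answer_eq]
  have hB := onList_eq 10 0 n rfl
  rw [hB]
  congr 1
  refine congrArg String.join (List.map_congr_left ?_)
  intro j _
  norm_num
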